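-- pv_equiv track=rewrite | github.com/brunordgsmrr/Autocad_lista | old/lista_v1.4.py | monta_lista
-- ===== SOURCE A (Python) =====
-- def monta_lista(nova_lista):
--
--     lista_formatada = []
--
--
--     # VERIFICAÇÃO DE CONTINUAÇÃO
--     for item in nova_lista:
--         # verifica se a proxima linha é continuação
--         indice_atual = nova_lista.index(item)
--         cont_descricao = ''
--
--         if indice_atual < (len(nova_lista) - 1):
--             prox_indice = indice_atual + 1
--             prox_item = nova_lista[prox_indice]
--
--             if prox_item[0:13].strip() == '' and prox_item[13:50].strip() != '':
--                 cont_descricao = prox_item.strip()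
--
--         if item[0:13].strip() == '' and item[13:50].strip() != '':
--             continue
--         # Fim do teste de continuação da linha
--
--         pos = item[5:8].strip()
--         quantidade = item[9:12].strip()
--         descricao = item[13:54].strip()
--         material = item[54:66].strip()
--         novo_item = f'POS.{pos:<3} {quantidade:<2} {descricao}{cont_descricao}  {material}'
--
--         lista_formatada.append(novo_item)
--
--     return lista_formatada
-- ===== SOURCE B (Python) =====
-- def monta_lista(nova_lista):
--     def eh_continuacao(linha):
--         return linha[0:13].strip() == '' and linha[13:50].strip() != ''
--
--     # pass 1: merge each continuation line into the record of the line just above it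
--     registros = []              # pairs (linha, continuacao)
--     anterior_normal = False
--     for linha in nova_lista:
--         if eh_continuacao(linha):
--             if anterior_normal:
--                 registros[-1] = (registros[-1][0], linha.strip())
--             anterior_normal = False
--         else:
--             registros.append((linha, ''))
--             anterior_normal = True
--
--     # pass 2: format the merged records
--     return [
--         f'POS.{linha[5:8].strip():<3} {linha[9:12].strip():<2} '
--         f'{linha[13:54].strip()}{cont}  {linha[54:66].strip()}'
--         for linha, cont in registros
--     ]
-- ===== Notes on version B (the rewrite author's own statement) =====
-- stated objective: faster
-- what changed: B works in two staged passes -- first merge each continuation line into the record of the line directly above it in a single scan, then format the merged records -- instead of A's single pass that calls nova_lista.index(item) and peeks at the successor for every line; Pre_ excludes lists in which a line directly followed by a continuation line occurs more than once, where A's list.index attaches the FIRST occurrence's continuation to every copy (an accidental first-vs-last choice).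
import Mathlib
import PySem

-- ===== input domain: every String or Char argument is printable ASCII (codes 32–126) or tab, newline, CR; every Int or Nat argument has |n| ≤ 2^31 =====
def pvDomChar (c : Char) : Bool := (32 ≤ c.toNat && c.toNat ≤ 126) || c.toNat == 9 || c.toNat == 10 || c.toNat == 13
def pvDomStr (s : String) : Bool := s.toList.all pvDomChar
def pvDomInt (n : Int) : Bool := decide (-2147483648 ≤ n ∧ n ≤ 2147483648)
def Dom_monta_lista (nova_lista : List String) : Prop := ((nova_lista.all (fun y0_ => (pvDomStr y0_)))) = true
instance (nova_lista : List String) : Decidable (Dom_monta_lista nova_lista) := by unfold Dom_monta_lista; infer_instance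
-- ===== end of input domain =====

-- B formats in two staged passes (merge continuation lines into the preceding record, then format),
-- replacing A's per-line list.index scan: O(n) instead of O(n^2).

-- ===== PORT A =====
-- item[a:b].strip()
def pvSeg (s : List Char) (a b : Int) : List Char :=
  PySem.Chars.strip (PySem.List.slice s (some a) (some b))

-- f'{s:<w}' : left-justify with spaces, no truncation (exact for width literals 3 and 2)
def pvLjust (s : List Char) (w : Nat) : List Char := s ++ List.replicate (w - s.length) ' '

-- f'POS.{pos:<3} {quantidade:<2} {descricao}{cont_descricao}  {material}'
def pvFmt (item cont : List Char) : String :=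
  String.ofList ("POS.".toList ++ pvLjust (pvSeg item 5 8) 3 ++ [' '] ++ pvLjust (pvSeg item 9 12) 2
    ++ [' '] ++ pvSeg item 13 54 ++ cont ++ [' ', ' '] ++ pvSeg item 54 66)

def monta_lista (nova_lista : List String) : List String :=
  nova_lista.foldl (fun lista_formatada item =>
    let it := item.toList
    -- indice_atual = nova_lista.index(item); item ∈ nova_lista, so index? is some (getD 0 unreachable)
    let indice_atual : Nat := (PySem.List.index? nova_lista item).getD 0
    let cont_descricao : List Char :=
      if indice_atual < nova_lista.length - 1 then
        let prox_item := ((nova_lista[indice_atual + 1]?).getD "").toList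
        if pvSeg prox_item 0 13 = [] ∧ pvSeg prox_item 13 50 ≠ [] then PySem.Chars.strip prox_item
        else []
      else []
    if pvSeg it 0 13 = [] ∧ pvSeg it 13 50 ≠ [] then lista_formatada
    else lista_formatada ++ [pvFmt it cont_descricao]) []

-- ===== PORT B =====
-- eh_continuacao(linha)
def pvEhCont (linha : List Char) : Bool :=
  (PySem.Chars.strip (PySem.List.slice linha (some 0) (some 13)) == []) &&
  !(PySem.Chars.strip (PySem.List.slice linha (some 13) (some 50)) == [])

-- f'POS.{linha[5:8].strip():<3} {linha[9:12].strip():<2} {linha[13:54].strip()}{cont}  {linha[54:66].strip()}'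
def pvLinhaSaida (linha cont : List Char) : String :=
  String.ofList ("POS.".toList
    ++ (PySem.Chars.strip (PySem.List.slice linha (some 5) (some 8))
        ++ List.replicate (3 - (PySem.Chars.strip (PySem.List.slice linha (some 5) (some 8))).length) ' ')
    ++ [' ']
    ++ (PySem.Chars.strip (PySem.List.slice linha (some 9) (some 12))
        ++ List.replicate (2 - (PySem.Chars.strip (PySem.List.slice linha (some 9) (some 12))).length) ' ')
    ++ [' '] ++ PySem.Chars.strip (PySem.List.slice linha (some 13) (some 54)) ++ cont
    ++ [' ', ' '] ++ PySem.Chars.strip (PySem.List.slice linha (some 54) (some 66)))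

-- pass 1 loop body: merge a continuation line into the last record (registros[-1] = (registros[-1][0], linha.strip()))
def pvPasso (st : List (String × List Char) × Bool) (linha : String) : List (String × List Char) × Bool :=
  if pvEhCont linha.toList then
    (if st.2 then
       st.1.dropLast ++ [(((st.1.getLast?).getD ("", [])).1, PySem.Chars.strip linha.toList)]
     else st.1, false)
  else (st.1 ++ [(linha, [])], true)

def monta_lista_alt (nova_lista : List String) : List String :=
  let registros := (nova_lista.foldl pvPasso ([], false)).1
  registros.map (fun p => pvLinhaSaida p.1.toList p.2)

-- ===== PRECONDITION & SPEC =====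
-- Pre_ excludes lists in which a line that is directly followed by a continuation line occurs
-- more than once: A looks the line up with nova_lista.index, so every copy reads the FIRST
-- occurrence's successor -- an accidental first-vs-last choice no caller would specify.
def Pre_monta_lista (nova_lista : List String) : Prop :=
  ∀ i < nova_lista.length, i + 1 < nova_lista.length →
    pvEhCont ((nova_lista.getD i "").toList) = false →
    pvEhCont ((nova_lista.getD (i + 1) "").toList) = true →
    nova_lista.count (nova_lista.getD i "") = 1
instance (nova_lista : List String) : Decidable (Pre_monta_lista nova_lista) := by unfold Pre_monta_lista; infer_instance

def pvWitness_monta_lista : List String :=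
  ["     1   2   widget", "             extra cont", "     2   1   bracket"]

def Spec_monta_lista (nova_lista : List String) (out : List String) : Prop := out = monta_lista_alt nova_lista
instance (nova_lista : List String) (out : List String) : Decidable (Spec_monta_lista nova_lista out) := by unfold Spec_monta_lista; infer_instance

-- ===== CLAIM (what is proved, stated in full; the proofs are below) =====
def Claim_equal_monta_lista : Prop := ∀ (nova_lista : List String), Dom_monta_lista nova_lista → Pre_monta_lista nova_lista → Spec_monta_lista nova_lista (monta_lista nova_lista)

-- ===== LEMMAS AND PROOFS =====

-- the continuation text a normal line receives: strip of the next line, if that next line is a continuation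
def pvContDe (xs : List String) : List Char :=
  match xs with
  | [] => []
  | y :: _ => if pvEhCont y.toList then PySem.Chars.strip y.toList else []

-- the merged records of a list, by structural recursion (reference form shared by both proofs)
def pvRecs (xs : List String) : List (String × List Char) :=
  match xs with
  | [] => []
  | x :: rest => if pvEhCont x.toList then pvRecs rest else (x, pvContDe rest) :: pvRecs rest

theorem pvEhCont_iff (l : List Char) :
    pvEhCont l = true ↔ (pvSeg l 0 13 = [] ∧ pvSeg l 13 50 ≠ []) := by
  simp [pvEhCont, pvSeg]

-- B's pass-1 fold computes pvRecs (flag false start; flag true start with a fresh last record)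
theorem pvLoop_spec (xs : List String) :
    (∀ acc, (xs.foldl pvPasso (acc, false)).1 = acc ++ pvRecs xs) ∧
    (∀ acc l, (xs.foldl pvPasso (acc ++ [(l, [])], true)).1 = acc ++ (l, pvContDe xs) :: pvRecs xs) := by
  induction xs with
  | nil => simp [pvRecs, pvContDe]
  | cons x rest ih =>
    constructor
    · intro acc
      by_cases hx : pvEhCont x.toList
      · have hstep : pvPasso (acc, false) x = (acc, false) := by simp [pvPasso, hx]
        rw [List.foldl_cons, hstep, ih.1]
        simp [pvRecs, hx]
      · have hstep : pvPasso (acc, false) x = (acc ++ [(x, [])], true) := by simp [pvPasso, hx]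
        rw [List.foldl_cons, hstep, ih.2]
        simp [pvRecs, pvContDe, hx]
    · intro acc l
      by_cases hx : pvEhCont x.toList
      · have hstep : pvPasso (acc ++ [(l, [])], true) x
            = (acc ++ [(l, PySem.Chars.strip x.toList)], false) := by
          simp [pvPasso, hx]
        rw [List.foldl_cons, hstep, ih.1]
        simp [pvRecs, pvContDe, hx]
      · have hstep : pvPasso (acc ++ [(l, [])], true) x
            = ((acc ++ [(l, [])]) ++ [(x, [])], true) := by simp [pvPasso, hx]
        rw [List.foldl_cons, hstep, ih.2]
        simp [pvRecs, pvContDe, hx]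

theorem monta_lista_alt_eq (nl : List String) :
    monta_lista_alt nl = (pvRecs nl).map (fun p => pvLinhaSaida p.1.toList p.2) := by
  unfold monta_lista_alt
  rw [(pvLoop_spec nl).1 []]
  simp

theorem pvFmt_eq (item cont : List Char) : pvFmt item cont = pvLinhaSaida item cont := by
  simp [pvFmt, pvLinhaSaida, pvLjust, pvSeg]

-- A's fold over a suffix, with the whole list fixed, appends the formatted merged records of that suffix
set_option maxHeartbeats 1000000 in
theorem monta_lista_suffix (suf : List String) :
    ∀ (pre : List String) (acc : List String),
      Pre_monta_lista (pre ++ suf) →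
      suf.foldl (fun lista_formatada item =>
        let it := item.toList
        let indice_atual : Nat := (PySem.List.index? (pre ++ suf) item).getD 0
        let cont_descricao : List Char :=
          if indice_atual < (pre ++ suf).length - 1 then
            let prox_item := (((pre ++ suf)[indice_atual + 1]?).getD "").toList
            if pvSeg prox_item 0 13 = [] ∧ pvSeg prox_item 13 50 ≠ [] then PySem.Chars.strip prox_item
            else []
          else []
        if pvSeg it 0 13 = [] ∧ pvSeg it 13 50 ≠ [] then lista_formatada
        else lista_formatada ++ [pvFmt it cont_descricao]) acc
      = acc ++ (pvRecs suf).map (fun p => pvLinhaSaida p.1.toList p.2) := by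
  induction suf with
  | nil => intro pre acc _; simp [pvRecs]
  | cons x rest ih =>
    intro pre acc hpre
    have h2 : Pre_monta_lista ((pre ++ [x]) ++ rest) := by
      simpa [List.append_assoc] using hpre
    simp only [List.foldl_cons]
    by_cases hx : pvEhCont x.toList
    · -- continuation line: skipped by A, absent from pvRecs
      have hcond := (pvEhCont_iff x.toList).mp hx
      rw [if_pos hcond]
      have hr : pvRecs (x :: rest) = pvRecs rest := by simp [pvRecs, hx]
      rw [hr, List.append_cons pre x rest]
      exact ih (pre ++ [x]) acc h2
    · -- normal line: A reads the successor of the line's FIRST occurrence; under Pre_ that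
      -- continuation text coincides with pvContDe rest
      have hcond := (pvEhCont_iff x.toList).not.mp (by simpa using hx)
      have hxf : pvEhCont x.toList = false := by simpa using hx
      have hmem : x ∈ pre ++ x :: rest := by simp
      obtain ⟨k, hk⟩ := Option.isSome_iff_exists.mp ((PySem.List.index?_isSome_iff _ x).mpr hmem)
      obtain ⟨p', s', hnl, hklen, hxp'⟩ := (PySem.List.index?_eq_some_iff _ _ _).mp hk
      have hgetpre : (pre ++ x :: rest)[pre.length]? = some x := by
        rw [List.getElem?_append_right le_rfl]; simp
      have hgetk : (pre ++ x :: rest)[k]? = some x := by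
        rw [hnl, ← hklen, List.getElem?_append_right le_rfl]; simp
      have hkle : k ≤ pre.length := by
        by_contra h
        push Not at h
        have hpx : p'[pre.length]? = some x := by
          have h0 := hgetpre
          rw [hnl] at h0
          rwa [List.getElem?_append_left (by omega)] at h0
        exact hxp' (List.mem_of_getElem? hpx)
      have hcount2 : k < pre.length → 2 ≤ (pre ++ x :: rest).count x := by
        intro hlt
        have hxs' : x ∈ s' := by
          have h0 := hgetpre
          rw [hnl, List.getElem?_append_right (by omega)] at h0
          rw [show pre.length - p'.length = (pre.length - p'.length - 1) + 1 by omega] at h0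
          simp only [List.getElem?_cons_succ] at h0
          exact List.mem_of_getElem? h0
        have h1 : 1 ≤ s'.count x := List.count_pos_iff.mpr hxs'
        rw [hnl, List.count_append, List.count_cons_self]
        omega
      have hgdk : (pre ++ x :: rest).getD k "" = x := by
        rw [List.getD_eq_getElem?_getD, hgetk]; rfl
      have hgdpre : (pre ++ x :: rest).getD pre.length "" = x := by
        rw [List.getD_eq_getElem?_getD, hgetpre]; rfl
      have hC : (if k < (pre ++ x :: rest).length - 1 then
            let prox_item := (((pre ++ x :: rest)[k + 1]?).getD "").toList
            if pvSeg prox_item 0 13 = [] ∧ pvSeg prox_item 13 50 ≠ [] then PySem.Chars.strip prox_item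
            else []
          else []) = pvContDe rest := by
        by_cases hkeq : k = pre.length
        · rw [hkeq]
          cases rest with
          | nil =>
            rw [if_neg (by simp)]
            rfl
          | cons y ys =>
            have hlt : pre.length < (pre ++ x :: y :: ys).length - 1 := by simp
            rw [if_pos hlt]
            have hy : (pre ++ x :: y :: ys)[pre.length + 1]? = some y := by
              rw [List.getElem?_append_right (by omega)]
              rw [show pre.length + 1 - pre.length = 1 by omega]
              rfl
            simp only [hy, Option.getD_some, pvContDe]
            by_cases hcy : pvEhCont y.toList
            · rw [if_pos ((pvEhCont_iff _).mp hcy), if_pos hcy]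
            · rw [if_neg ((pvEhCont_iff _).not.mp (by simpa using hcy)), if_neg hcy]
        · have hklt : k < pre.length := lt_of_le_of_ne hkle hkeq
          have hlt : k < (pre ++ x :: rest).length - 1 := by simp; omega
          rw [if_pos hlt]
          -- the successor of the first occurrence is not a continuation line, else Pre_ would
          -- force the line to be unique, contradicting its two occurrences at k and pre.length
          have hnc : pvEhCont (((pre ++ x :: rest)[k + 1]?.getD "").toList) = false := by
            by_contra h
            have hct : pvEhCont (((pre ++ x :: rest).getD (k + 1) "").toList) = true := by
              rw [List.getD_eq_getElem?_getD]
              simpa using h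
            have h1 := hpre k (by simp; omega) (by simp; omega) (by rwa [hgdk]) hct
            rw [hgdk] at h1
            have := hcount2 hklt
            omega
          have hni : ¬ (pvSeg ((pre ++ x :: rest)[k + 1]?.getD "").toList 0 13 = [] ∧
              pvSeg ((pre ++ x :: rest)[k + 1]?.getD "").toList 13 50 ≠ []) := by
            intro hc
            rw [(pvEhCont_iff _).mpr hc] at hnc
            exact Bool.true_eq_false.mp hnc
          rw [if_neg hni]
          cases rest with
          | nil => rfl
          | cons y ys =>
            by_cases hcy : pvEhCont y.toList
            · exfalso
              have hgy : (pre ++ x :: y :: ys).getD (pre.length + 1) "" = y := by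
                rw [List.getD_eq_getElem?_getD, List.getElem?_append_right (by omega)]
                rw [show pre.length + 1 - pre.length = 1 by omega]
                rfl
              have h1 := hpre pre.length (by simp) (by simp)
                (by rwa [hgdpre]) (by rwa [hgy])
              rw [hgdpre] at h1
              have := hcount2 hklt
              omega
            · simp [pvContDe, hcy]
      rw [if_neg hcond]
      simp only [hk, Option.getD_some]
      rw [hC]
      have hr : pvRecs (x :: rest) = (x, pvContDe rest) :: pvRecs rest := by
        simp [pvRecs, hx]
      rw [hr, List.append_cons pre x rest, ih (pre ++ [x]) _ h2]
      simp [pvFmt_eq]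

-- ===== VERDICT (by name: the statement is the Claim_ definition above) =====
theorem monta_lista_spec : Claim_equal_monta_lista := by
  intro nl _ hpre
  unfold Spec_monta_lista monta_lista
  rw [monta_lista_alt_eq]
  simpa using monta_lista_suffix nl [] [] (by simpa using hpre)
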